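-- pv_equiv track=rewrite | github.com/MESH-Research/knowledge-commons-works | site/kcworks/utils/utils.py | matching_list_parts_skip_digits
-- ===== SOURCE A (Python) =====
-- def matching_list_parts_skip_digits(listA: list, listB: list) -> list:
--     """Check if the lists begin with a matching set of elements, ignoring digits.
--
--     Parameters:
--         listA: The list to check.
--         listB: The list to compare to.
--
--     Returns:
--         The list of elements that match the restricted parts.
--         If the lists do not match, returns an empty list.
--
--     Note:
--         Assumes that listB may pack digit elements that listA has, as when listB
--         is a field path that omits indices for list fields. ListA is expected to
--         have the indices.
--     """
--     i = j = 0
--     while i < len(listA) and j < len(listB):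
--         # If restricted part is a digit, it must match exactly
--         if listB[j].isdigit():
--             if not listA[i].isdigit() or listA[i] != listB[j]:
--                 return []
--             i += 1
--             j += 1
--         # If changed part is a digit but restricted isn't, skip the digit
--         elif listA[i].isdigit():
--             i += 1
--         # Otherwise compare the parts normally
--         else:
--             if listA[i] != listB[j]:
--                 return []
--             i += 1
--             j += 1
--     # Make sure we've used all restricted parts
--     if j == len(listB):
--         return listA[:i]
--     else:
--         return []
-- ===== SOURCE B (Python) =====
-- def matching_list_parts_skip_digits(listA: list, listB: list) -> list:
--     def consumed(a, b):
--         """Matched prefix of a against b as a fresh list, or None on mismatch."""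
--         if not b:
--             return []
--         if not a:
--             return None
--         x, y = a[0], b[0]
--         if y.isdigit():
--             rest = consumed(a[1:], b[1:]) if x.isdigit() and x == y else None
--         elif x.isdigit():
--             rest = consumed(a[1:], b)
--         else:
--             rest = consumed(a[1:], b[1:]) if x == y else None
--         return None if rest is None else [x] + rest
--
--     result = consumed(listA, listB)
--     return [] if result is None else result
-- ===== Notes on version B (the rewrite author's own statement) =====
-- stated objective: alternative
-- what changed: Replaces the index-based two-pointer loop that finally slices listA[:i] by a structural recursion over both lists returning Optional matched-prefix, consing the result together on the way back instead of tracking indices and slicing.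
import Mathlib
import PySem

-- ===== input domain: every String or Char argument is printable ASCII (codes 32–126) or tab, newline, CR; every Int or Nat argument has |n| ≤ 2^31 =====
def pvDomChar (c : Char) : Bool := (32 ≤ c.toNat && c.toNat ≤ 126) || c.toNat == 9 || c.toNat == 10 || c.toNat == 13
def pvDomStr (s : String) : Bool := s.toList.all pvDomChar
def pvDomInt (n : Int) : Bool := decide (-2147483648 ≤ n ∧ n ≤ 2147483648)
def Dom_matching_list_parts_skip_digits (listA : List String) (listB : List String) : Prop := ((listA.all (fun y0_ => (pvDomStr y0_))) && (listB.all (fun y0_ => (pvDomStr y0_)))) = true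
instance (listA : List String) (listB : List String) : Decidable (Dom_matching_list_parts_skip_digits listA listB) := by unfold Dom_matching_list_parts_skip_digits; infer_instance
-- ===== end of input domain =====

set_option maxRecDepth 4096


-- B: structural recursion over both lists returning an Optional matched prefix built by consing, instead of A's index-based two-pointer loop that slices listA[:i] at the end (alternative decomposition, same cost).
-- ===== PORT A =====
def pvLoopA (listA listB : List String) (i j : Nat) : List String :=
  if h : i < listA.length ∧ j < listB.length then
    if PySem.Str.strIsdigit listB[j] then
      if ¬ PySem.Str.strIsdigit listA[i] ∨ listA[i] ≠ listB[j] then []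
      else pvLoopA listA listB (i+1) (j+1)
    else if PySem.Str.strIsdigit listA[i] then
      pvLoopA listA listB (i+1) j
    else if listA[i] ≠ listB[j] then []
    else pvLoopA listA listB (i+1) (j+1)
  else if j = listB.length then PySem.List.slice listA none (some (i : Int))
  else []
termination_by listA.length - i
decreasing_by all_goals omega

def matching_list_parts_skip_digits (listA : List String) (listB : List String) : List String :=
  pvLoopA listA listB 0 0

-- ===== PORT B =====
-- `consumed(a, b)`: matched prefix of a against b, or none on mismatch.
def pvConsumed (a b : List String) : Option (List String) :=
  match a, b with
  | _, [] => some []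
  | [], _ :: _ => none
  | x :: a', y :: b' =>
    if PySem.Str.strIsdigit y then
      if PySem.Str.strIsdigit x ∧ x = y then (pvConsumed a' b').map (x :: ·) else none
    else if PySem.Str.strIsdigit x then (pvConsumed a' b).map (x :: ·)
    else if x = y then (pvConsumed a' b').map (x :: ·) else none

def matching_list_parts_skip_digits_alt (listA : List String) (listB : List String) : List String :=
  (pvConsumed listA listB).getD []

-- ===== PRECONDITION & SPEC =====
def Spec_matching_list_parts_skip_digits (listA : List String) (listB : List String) (out : List String) : Prop := out = matching_list_parts_skip_digits_alt listA listB
instance (listA : List String) (listB : List String) (out : List String) : Decidable (Spec_matching_list_parts_skip_digits listA listB out) := by unfold Spec_matching_list_parts_skip_digits; infer_instance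

-- ===== CLAIM (what is proved, stated in full; the proofs are below) =====
def Claim_equal_matching_list_parts_skip_digits : Prop := ∀ (listA : List String) (listB : List String), Dom_matching_list_parts_skip_digits listA listB → Spec_matching_list_parts_skip_digits listA listB (matching_list_parts_skip_digits listA listB)

-- ===== LEMMAS AND PROOFS =====

lemma pvTake_succ_of_lt (l : List String) (i : Nat) (h : i < l.length) :
    l.take (i+1) = l.take i ++ [l[i]] := by
  rw [List.take_add_one, List.getElem?_eq_getElem h]
  rfl

lemma pvLoop_eq (listA listB : List String) :
    ∀ n i j, listA.length - i ≤ n → i ≤ listA.length → j ≤ listB.length →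
      pvLoopA listA listB i j
        = ((pvConsumed (listA.drop i) (listB.drop j)).map (listA.take i ++ ·)).getD [] := by
  intro n
  induction n with
  | zero =>
    intro i j hn hi hj
    have hieq : i = listA.length := by omega
    rw [pvLoopA, dif_neg (by omega : ¬ (i < listA.length ∧ j < listB.length))]
    subst hieq
    rcases Nat.lt_or_ge j listB.length with hjlt | hjge
    · rw [if_neg (by omega : ¬ j = listB.length), List.drop_length,
        List.drop_eq_getElem_cons hjlt, pvConsumed]
      simp
    · have : j = listB.length := by omega
      subst this
      rw [if_pos rfl, List.drop_length, List.drop_length, pvConsumed]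
      simp [PySem.List.slice_to_natCast]
  | succ n ih =>
    intro i j hn hi hj
    rcases Nat.lt_or_ge i listA.length with hilt | hige
    · rcases Nat.lt_or_ge j listB.length with hjlt | hjge
      · rw [pvLoopA, dif_pos ⟨hilt, hjlt⟩,
          List.drop_eq_getElem_cons hilt, List.drop_eq_getElem_cons hjlt, pvConsumed]
        have htake := pvTake_succ_of_lt listA i hilt
        by_cases hb : PySem.Str.strIsdigit listB[j] = true
        · rw [if_pos hb, if_pos hb]
          by_cases hbad : ¬ PySem.Str.strIsdigit listA[i] = true ∨ listA[i] ≠ listB[j]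
          · rw [if_pos hbad, if_neg (by tauto)]
            simp
          · rw [if_neg hbad, if_pos (by tauto)]
            rw [ih (i+1) (j+1) (by omega) (by omega) (by omega)]
            cases pvConsumed (listA.drop (i+1)) (listB.drop (j+1)) with
            | none => simp
            | some l => simp only [Option.map_some, Option.getD_some, htake, List.append_assoc, List.singleton_append]
        · rw [if_neg hb, if_neg hb]
          by_cases ha : PySem.Str.strIsdigit listA[i] = true
          · rw [if_pos ha, if_pos ha,
              ih (i+1) j (by omega) (by omega) hj, List.drop_eq_getElem_cons hjlt]
            cases pvConsumed (listA.drop (i+1)) (listB[j] :: listB.drop (j+1)) with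
            | none => simp
            | some l => simp only [Option.map_some, Option.getD_some, htake, List.append_assoc, List.singleton_append]
          · rw [if_neg ha, if_neg ha]
            by_cases hne : listA[i] ≠ listB[j]
            · rw [if_pos hne, if_neg (by tauto)]
              simp
            · rw [if_neg hne, if_pos (by tauto),
                ih (i+1) (j+1) (by omega) (by omega) (by omega)]
              cases pvConsumed (listA.drop (i+1)) (listB.drop (j+1)) with
              | none => simp
              | some l => simp only [Option.map_some, Option.getD_some, htake, List.append_assoc, List.singleton_append]
      · have : j = listB.length := by omega
        subst this
        rw [pvLoopA, dif_neg (by omega : ¬ (i < listA.length ∧ listB.length < listB.length)),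
          if_pos rfl, List.drop_length, pvConsumed]
        simp [PySem.List.slice_to_natCast]
    · have : j = listB.length ∨ j < listB.length := by omega
      have hieq : i = listA.length := by omega
      rw [pvLoopA, dif_neg (by omega : ¬ (i < listA.length ∧ j < listB.length))]
      subst hieq
      rcases Nat.lt_or_ge j listB.length with hjlt | hjge
      · rw [if_neg (by omega : ¬ j = listB.length), List.drop_length,
          List.drop_eq_getElem_cons hjlt, pvConsumed]
        simp
      · have : j = listB.length := by omega
        subst this
        rw [if_pos rfl, List.drop_length, List.drop_length, pvConsumed]
        simp [PySem.List.slice_to_natCast]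

-- ===== VERDICT (by name: the statement is the Claim_ definition above) =====
theorem matching_list_parts_skip_digits_spec : Claim_equal_matching_list_parts_skip_digits := by
  intro listA listB _
  unfold Spec_matching_list_parts_skip_digits matching_list_parts_skip_digits matching_list_parts_skip_digits_alt
  have h := pvLoop_eq listA listB listA.length 0 0 (by omega) (by omega) (by omega)
  simp only [List.drop_zero, List.take_zero, List.nil_append] at h
  rw [h]
  cases pvConsumed listA listB <;> simp
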